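-- pv_equiv track=rewrite | github.com/boost-devs/coding-test-study | coodingpenguin/brute_force/15686_치킨배달.py | get_smallest_dist
-- ===== SOURCE A (Python) =====
-- from itertools import combinations
--
-- def get_chicken_and_home_pos(n, arr):
--     chicken, home = [], []
--     for y in range(n):
--         for x in range(n):
--             # 가정집인 경우
--             if arr[y][x] == 1:
--                 home.append((y, x))
--             # 치킨집인 경우
--             if arr[y][x] == 2:
--                 chicken.append((y, x))
--     return chicken, home
--
-- def get_smallest_dist(n, m, arr):
--     chicken_pos, home_pos = get_chicken_and_home_pos(n, arr)  # 치킨집, 가정집 위치 리스트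
--     combs = list(combinations(chicken_pos, m))  # 크기 m에 가능한 조합들
--     min_chicken_dist_sum = int(1e9)  # 최소 치킨거리 총합
--     # 모든 조합에 대하여
--     for comb in combs:
--         chicken_dist_sum = 0  # 치킨 거리 합
--         # 각 집에 대해서
--         for hy, hx in home_pos:
--             chicken_dist = 100  # 최소 치킨 거리
--             # 가능한 치킨집에서의 최소 치킨 거리를 구한다
--             for cy, cx in comb:
--                 chicken_dist = min(chicken_dist, abs(hy - cy) + abs(hx - cx))
--             chicken_dist_sum += chicken_dist  # 합에 추가
--         # 최소 치킨거리 총합과 비교하여 최솟값으로 갱신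
--         min_chicken_dist_sum = min(min_chicken_dist_sum, chicken_dist_sum)
--     return min_chicken_dist_sum
-- ===== SOURCE B (Python) =====
-- def get_smallest_dist(n, m, arr):
--     homes = [(y, x) for y in range(n) for x in range(n) if arr[y][x] == 1]
--     chickens = [(y, x) for y in range(n) for x in range(n) if arr[y][x] == 2]
--     # per-chicken-store column: capped distances to every home
--     cols = [[min(100, abs(hy - cy) + abs(hx - cx)) for (hy, hx) in homes]
--             for (cy, cx) in chickens]
--     best = int(1e9)
--
--     def dfs(i, k, cur):
--         nonlocal best
--         if k == 0:
--             best = min(best, sum(cur))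
--             return
--         if len(cols) - i < k:
--             return
--         dfs(i + 1, k - 1, [min(a, b) for a, b in zip(cur, cols[i])])
--         dfs(i + 1, k, cur)
--
--     dfs(0, m, [100] * len(homes))
--     return best
-- ===== Notes on version B (the rewrite author's own statement) =====
-- stated objective: alternative
-- what changed: B precomputes a per-chicken-store column of capped distances to every home, then enumerates m-subsets by a choose/skip DFS over that table that maintains the vector of per-home minima incrementally and prunes when too few stores remain, instead of A's materialised combinations list with a triple nested distance loop.
import Mathlib
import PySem

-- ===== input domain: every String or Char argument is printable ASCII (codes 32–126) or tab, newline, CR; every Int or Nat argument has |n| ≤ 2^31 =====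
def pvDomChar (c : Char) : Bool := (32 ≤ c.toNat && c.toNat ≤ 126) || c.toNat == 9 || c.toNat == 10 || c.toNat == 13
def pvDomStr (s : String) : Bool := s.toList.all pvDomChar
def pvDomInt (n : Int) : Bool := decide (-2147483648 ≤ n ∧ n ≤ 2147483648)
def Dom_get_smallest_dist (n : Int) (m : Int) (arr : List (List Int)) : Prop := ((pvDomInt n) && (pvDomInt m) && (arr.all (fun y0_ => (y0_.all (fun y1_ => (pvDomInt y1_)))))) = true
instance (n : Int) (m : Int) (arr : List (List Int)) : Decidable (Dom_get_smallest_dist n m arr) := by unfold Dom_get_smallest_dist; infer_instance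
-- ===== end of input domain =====

-- B replaces A's materialised combinations list + triple nested loop by a precomputed
-- per-store table of capped home distances and a choose/skip DFS that maintains the
-- per-home minima incrementally (objective: alternative algorithm of similar cost).

-- ===== PORT A =====
-- arr[y][x]; inside Pre_ the indices are in range, so the default is never used
def pvCell (arr : List (List Int)) (y x : Int) : Int :=
  PySem.List.pyGetD (PySem.List.pyGetD arr y []) x 0

-- itertools.combinations(l, k) in itertools' order (library call, ported by hand)
def combsA {α : Type} : Nat → List α → List (List α)
  | 0, _ => [[]]
  | _ + 1, [] => []
  | k + 1, x :: xs => (combsA k xs).map (fun s => x :: s) ++ combsA (k + 1) xs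

-- loop body of A's double scan: append to home on 1, to chicken on 2
def pvStep (arr : List (List Int)) (y : Int)
    (acc : List (Int × Int) × List (Int × Int)) (x : Int) :
    List (Int × Int) × List (Int × Int) :=
  let acc := if pvCell arr y x == 1 then (acc.1, acc.2 ++ [(y, x)]) else acc
  if pvCell arr y x == 2 then (acc.1 ++ [(y, x)], acc.2) else acc

def get_chicken_and_home_pos (n : Int) (arr : List (List Int)) :
    List (Int × Int) × List (Int × Int) :=
  (PySem.List.pyRange 0 n 1).foldl (fun acc y =>
    (PySem.List.pyRange 0 n 1).foldl (pvStep arr y) acc) ([], [])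

def get_smallest_dist (n : Int) (m : Int) (arr : List (List Int)) : Int :=
  let p := get_chicken_and_home_pos n arr
  (combsA m.toNat p.1).foldl
    (fun best comb =>
      min best (p.2.foldl
        (fun s hh => s + comb.foldl (fun d c => min d (|hh.1 - c.1| + |hh.2 - c.2|)) 100)
        0))
    1000000000

-- ===== PORT B =====
def pvHomes (n : Int) (arr : List (List Int)) : List (Int × Int) :=
  (PySem.List.pyRange 0 n 1).flatMap (fun y =>
    ((PySem.List.pyRange 0 n 1).filter (fun x => pvCell arr y x == 1)).map (fun x => (y, x)))

def pvChickens (n : Int) (arr : List (List Int)) : List (Int × Int) :=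
  (PySem.List.pyRange 0 n 1).flatMap (fun y =>
    ((PySem.List.pyRange 0 n 1).filter (fun x => pvCell arr y x == 2)).map (fun x => (y, x)))

def pvColOf (homes : List (Int × Int)) (c : Int × Int) : List Int :=
  homes.map (fun h => min 100 (|h.1 - c.1| + |h.2 - c.2|))

-- dfs(i, k, cur): recursion on the remaining suffix cols[i:] of the column table
def pvDfs : List (List Int) → Nat → List Int → Int → Int
  | _, 0, cur, best => min best cur.sum
  | [], _ + 1, _, best => best
  | c :: cols, k + 1, cur, best =>
      if cols.length + 1 < k + 1 then best
      else pvDfs cols (k + 1) cur (pvDfs cols k (List.zipWith min cur c) best)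

def get_smallest_dist_alt (n : Int) (m : Int) (arr : List (List Int)) : Int :=
  let homes := pvHomes n arr
  let cols := (pvChickens n arr).map (pvColOf homes)
  pvDfs cols m.toNat (List.replicate homes.length 100) 1000000000

-- ===== PRECONDITION & SPEC =====
-- Pre_ excludes exactly the inputs where Python A raises: m < 0 (ValueError from
-- combinations) and arrays too short/ragged for the n×n index scan (IndexError).
def Pre_get_smallest_dist (n : Int) (m : Int) (arr : List (List Int)) : Prop :=
  0 ≤ m ∧ n ≤ arr.length ∧ ∀ row ∈ arr.take n.toNat, n ≤ (row.length : Int)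

instance (n : Int) (m : Int) (arr : List (List Int)) : Decidable (Pre_get_smallest_dist n m arr) := by
  unfold Pre_get_smallest_dist; infer_instance

def pvWitness_get_smallest_dist : Int × Int × List (List Int) := (2, 1, [[1, 2], [0, 0]])

def Spec_get_smallest_dist (n : Int) (m : Int) (arr : List (List Int)) (out : Int) : Prop := out = get_smallest_dist_alt n m arr
instance (n : Int) (m : Int) (arr : List (List Int)) (out : Int) : Decidable (Spec_get_smallest_dist n m arr out) := by unfold Spec_get_smallest_dist; infer_instance

-- ===== CLAIM (what is proved, stated in full; the proofs are below) =====
def Claim_equal_get_smallest_dist : Prop := ∀ (n : Int) (m : Int) (arr : List (List Int)), Dom_get_smallest_dist n m arr → Pre_get_smallest_dist n m arr → Spec_get_smallest_dist n m arr (get_smallest_dist n m arr)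

-- ===== LEMMAS AND PROOFS =====

theorem pv_inner_fold (arr : List (List Int)) (y : Int) (xs : List Int) :
    ∀ (c h : List (Int × Int)),
      xs.foldl (pvStep arr y) (c, h)
      = (c ++ (xs.filter (fun x => pvCell arr y x == 2)).map (fun x => (y, x)),
         h ++ (xs.filter (fun x => pvCell arr y x == 1)).map (fun x => (y, x))) := by
  induction xs with
  | nil => simp
  | cons x xs ih =>
    intro c h
    rw [List.foldl_cons]
    by_cases h1 : pvCell arr y x == 1
    · have h2 : ¬ (pvCell arr y x == 2) := by
        simp only [beq_iff_eq] at h1 ⊢; omega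
      have hs : pvStep arr y (c, h) x = (c, h ++ [(y, x)]) := by
        unfold pvStep; simp [h1, h2]
      rw [hs, ih]
      simp [h1, h2, List.append_assoc]
    · by_cases h2 : pvCell arr y x == 2
      · have hs : pvStep arr y (c, h) x = (c ++ [(y, x)], h) := by
          unfold pvStep; simp [h1, h2]
        rw [hs, ih]
        simp [h1, h2, List.append_assoc]
      · have hs : pvStep arr y (c, h) x = (c, h) := by
          unfold pvStep; simp [h1, h2]
        rw [hs, ih]
        simp [h1, h2]

theorem pv_outer_fold (arr : List (List Int)) (rs : List Int) (ys : List Int) :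
    ∀ (c h : List (Int × Int)),
      ys.foldl (fun acc y => rs.foldl (pvStep arr y) acc) (c, h)
      = (c ++ ys.flatMap (fun y => (rs.filter (fun x => pvCell arr y x == 2)).map (fun x => (y, x))),
         h ++ ys.flatMap (fun y => (rs.filter (fun x => pvCell arr y x == 1)).map (fun x => (y, x)))) := by
  induction ys with
  | nil => simp
  | cons y ys ih =>
    intro c h
    rw [List.foldl_cons, pv_inner_fold, ih]
    simp [List.append_assoc]

theorem pv_extract (n : Int) (arr : List (List Int)) :
    get_chicken_and_home_pos n arr = (pvChickens n arr, pvHomes n arr) := by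
  unfold get_chicken_and_home_pos pvChickens pvHomes
  simpa using pv_outer_fold arr (PySem.List.pyRange 0 n 1) (PySem.List.pyRange 0 n 1) [] []

theorem combsA_nil_of_lt {α : Type} : ∀ (l : List α) (k : Nat), l.length < k → combsA k l = [] := by
  intro l
  induction l with
  | nil =>
    intro k hk
    cases k with
    | zero => omega
    | succ k => rfl
  | cons x xs ih =>
    intro k hk
    cases k with
    | zero => omega
    | succ k =>
      simp only [combsA]
      rw [ih k (by simp at hk ⊢; omega), ih (k + 1) (by simp at hk ⊢; omega)]
      simp

theorem pvDfs_eq : ∀ (cols : List (List Int)) (k : Nat) (cur : List Int) (best : Int),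
    pvDfs cols k cur best
    = (combsA k cols).foldl
        (fun b S => min b (S.foldl (fun cu c => List.zipWith min cu c) cur).sum) best := by
  intro cols
  induction cols with
  | nil =>
    intro k cur best
    cases k with
    | zero => simp [pvDfs, combsA]
    | succ k => simp [pvDfs, combsA]
  | cons c cols ih =>
    intro k cur best
    cases k with
    | zero => simp [pvDfs, combsA]
    | succ k =>
      simp only [pvDfs]
      by_cases hp : cols.length + 1 < k + 1
      · rw [if_pos hp]
        simp only [combsA]
        rw [combsA_nil_of_lt cols k (by omega), combsA_nil_of_lt cols (k + 1) (by omega)]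
        simp
      · rw [if_neg hp]
        simp only [combsA, List.foldl_append, List.foldl_map]
        rw [ih, ih]
        simp [List.foldl_cons]

theorem combsA_map {α β : Type} (f : α → β) : ∀ (l : List α) (k : Nat),
    combsA k (l.map f) = (combsA k l).map (List.map f) := by
  intro l
  induction l with
  | nil => intro k; cases k <;> simp [combsA]
  | cons x xs ih =>
    intro k
    cases k with
    | zero => simp [combsA]
    | succ k => simp [combsA, ih, Function.comp]

theorem pv_zipWith_min_map {H : Type} (homes : List H) (g1 g2 : H → Int) :
    List.zipWith min (homes.map g1) (homes.map g2) = homes.map (fun h => min (g1 h) (g2 h)) := by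
  induction homes with
  | nil => rfl
  | cons h t ih => simp [ih]

theorem pv_fold_cols (homes : List (Int × Int)) :
    ∀ (S : List (Int × Int)) (g : (Int × Int) → Int),
      (S.map (pvColOf homes)).foldl (fun cu c => List.zipWith min cu c) (homes.map g)
      = homes.map (fun h => S.foldl (fun v c => min v (min 100 (|h.1 - c.1| + |h.2 - c.2|))) (g h)) := by
  intro S
  induction S with
  | nil => intro g; simp
  | cons c S ih =>
    intro g
    simp only [List.map_cons, List.foldl_cons, pvColOf, pv_zipWith_min_map]
    exact ih (fun h => min (g h) (min 100 (|h.1 - c.1| + |h.2 - c.2|)))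

theorem pv_cap_fold (hy hx : Int) : ∀ (S : List (Int × Int)) (v : Int), v ≤ 100 →
    S.foldl (fun d c => min d (min 100 (|hy - c.1| + |hx - c.2|))) v
    = S.foldl (fun d c => min d (|hy - c.1| + |hx - c.2|)) v := by
  intro S
  induction S with
  | nil => intro v _; rfl
  | cons c S ih =>
    intro v hv
    simp only [List.foldl_cons]
    rw [show min v (min 100 (|hy - c.1| + |hx - c.2|)) = min v (|hy - c.1| + |hx - c.2|) by omega]
    exact ih _ (by omega)

theorem pv_foldl_add_sum {α : Type} (f : α → Int) : ∀ (l : List α) (s : Int),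
    l.foldl (fun s h => s + f h) s = s + (l.map f).sum := by
  intro l
  induction l with
  | nil => simp
  | cons x xs ih => intro s; simp [ih, add_assoc]

theorem pv_foldl_ext {α β : Type} (f g : β → α → β) (h : ∀ b a, f b a = g b a) :
    ∀ (l : List α) (b0 : β), l.foldl f b0 = l.foldl g b0 := by
  intro l
  induction l with
  | nil => intro b0; rfl
  | cons x xs ih => intro b0; rw [List.foldl_cons, List.foldl_cons, h, ih]

-- ===== VERDICT (by name: the statement is the Claim_ definition above) =====
theorem get_smallest_dist_spec : Claim_equal_get_smallest_dist := by
  intro n m arr _dom _pre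
  unfold Spec_get_smallest_dist get_smallest_dist get_smallest_dist_alt
  rw [pv_extract]
  dsimp only
  rw [pvDfs_eq, combsA_map, List.foldl_map]
  have hrep : List.replicate (pvHomes n arr).length (100 : Int)
      = (pvHomes n arr).map (fun _ => (100 : Int)) := by simp
  rw [hrep]
  apply pv_foldl_ext
  intro b S
  rw [pv_fold_cols, pv_foldl_add_sum, zero_add]
  congr 1
  congr 1
  apply List.map_congr_left
  intro h _
  exact (pv_cap_fold h.1 h.2 S 100 (by omega)).symm
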